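-- pv_equiv track=rewrite | github.com/mananm12/ProjectEuler | PE54.py | nextHighest
-- ===== SOURCE A (Python) =====
-- def lowCard (playerHand) :
-- 	lowIndex = 14
-- 	for x in range(0, len(playerHand)) :
-- 		if (playerHand[x][0] < lowIndex) :
-- 			lowIndex = playerHand[x][0]
-- 	return lowIndex
--
-- def nextHighest (playerHand, prevHigh) :
-- 	if prevHigh == lowCard(playerHand) :
-- 		return prevHigh
-- 	highIndex = 0
-- 	for x in range(0, len(playerHand)) :
-- 		if (playerHand[x][0] > highIndex and playerHand[x][0] < prevHigh) :
-- 			highIndex = playerHand[x][0]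
-- 	return highIndex
-- ===== SOURCE B (Python) =====
-- def nextHighest(playerHand, prevHigh):
--     values = sorted({v for v, _ in playerHand})
--     if values and prevHigh == values[0]:
--         return prevHigh
--     best = 0
--     for v in values:
--         if v >= prevHigh:
--             break
--         if v > best:
--             best = v
--     return best
-- ===== Notes on version B (the rewrite author's own statement) =====
-- stated objective: alternative
-- what changed: A makes two separate index-based linear scans (a running min to detect 'prevHigh is the lowest card', then a running max over values below prevHigh); B sorts the distinct card values once, reads the minimum off the sorted head, and walks the ascending list with an early break to find the highest value below prevHigh.
-- intended difference: On hands all of whose card values exceed 14 (including the empty hand) with prevHigh equal to 14 or to the hand's minimum value, A's sentinel seeds (lowIndex=14, highIndex=0) make it return 14 resp. 0; B returns 0 resp. prevHigh, the intended 'no card below prevHigh' resp. 'prevHigh is the lowest card' answers. — e.g. on nextHighest([(20, "S")], 14): A returns 14, B returns 0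
import Mathlib
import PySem

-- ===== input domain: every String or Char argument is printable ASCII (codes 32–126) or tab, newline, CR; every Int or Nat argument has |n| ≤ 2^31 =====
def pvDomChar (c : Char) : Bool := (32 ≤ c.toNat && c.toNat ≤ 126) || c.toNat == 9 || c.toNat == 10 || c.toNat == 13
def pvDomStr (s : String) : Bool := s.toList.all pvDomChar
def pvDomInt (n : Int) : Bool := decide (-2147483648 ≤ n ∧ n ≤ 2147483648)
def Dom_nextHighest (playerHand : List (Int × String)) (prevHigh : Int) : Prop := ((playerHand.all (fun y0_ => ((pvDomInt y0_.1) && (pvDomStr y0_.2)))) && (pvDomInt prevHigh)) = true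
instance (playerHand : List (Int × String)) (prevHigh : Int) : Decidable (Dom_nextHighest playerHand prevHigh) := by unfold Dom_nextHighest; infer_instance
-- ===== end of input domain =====

-- B replaces A's two index-loop scans (running min seeded 14, running max seeded 0) by
-- sorting the distinct card values once and walking the ascending list with an early break
-- (objective: alternative; same practical cost on hands of a few cards).

-- ===== PORT A =====
def lowCardA (playerHand : List (Int × String)) : Int :=
  (PySem.List.pyRange 0 (playerHand.length : Int) 1).foldl
    (fun lowIndex x =>
      let c := PySem.List.pyGetD playerHand x ((0 : Int), "")
      if c.1 < lowIndex then c.1 else lowIndex) 14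

def nextHighest (playerHand : List (Int × String)) (prevHigh : Int) : Int :=
  if prevHigh = lowCardA playerHand then prevHigh
  else
    (PySem.List.pyRange 0 (playerHand.length : Int) 1).foldl
      (fun highIndex x =>
        let c := PySem.List.pyGetD playerHand x ((0 : Int), "")
        if c.1 > highIndex ∧ c.1 < prevHigh then c.1 else highIndex) 0

-- ===== PORT B =====
-- the 'for v in values: …' loop of Source B (ascending walk, early break, running best)
def walkB (l : List Int) (prevHigh best : Int) : Int :=
  match l with
  | [] => best
  | v :: t =>
      if v ≥ prevHigh then best
      else walkB t prevHigh (if v > best then v else best)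

def nextHighest_alt (playerHand : List (Int × String)) (prevHigh : Int) : Int :=
  let values := PySem.List.sorted (PySem.Set.ofList (playerHand.map (fun c => c.1))) (fun x => x) false
  if values.head? = some prevHigh then prevHigh
  else walkB values prevHigh 0

-- ===== PRECONDITION & SPEC =====
-- On hands all of whose card values exceed 14 (including the empty hand) with prevHigh equal
-- to 14 or to the hand's minimum value, A's sentinel seeds (lowIndex=14, highIndex=0) make it
-- return 14 resp. 0; B returns 0 resp. prevHigh, the intended 'no card below prevHigh' resp.
-- 'prevHigh is the lowest card' answers.
def D_nextHighest (playerHand : List (Int × String)) (prevHigh : Int) : Prop :=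
  (∀ c ∈ playerHand, 14 < c.1) ∧
  (prevHigh = 14 ∨ ((∃ c ∈ playerHand, c.1 = prevHigh) ∧ ∀ c ∈ playerHand, prevHigh ≤ c.1))
instance (playerHand : List (Int × String)) (prevHigh : Int) : Decidable (D_nextHighest playerHand prevHigh) := by unfold D_nextHighest; infer_instance

def Spec_nextHighest (playerHand : List (Int × String)) (prevHigh : Int) (out : Int) : Prop := ¬ D_nextHighest playerHand prevHigh → out = nextHighest_alt playerHand prevHigh
instance (playerHand : List (Int × String)) (prevHigh : Int) (out : Int) : Decidable (Spec_nextHighest playerHand prevHigh out) := by unfold Spec_nextHighest; infer_instance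

def pvDiffWitness_nextHighest : (List (Int × String)) × Int := ([(20, "S")], 14)
def pvDiffWitnessOut_nextHighest : Int × Int := (14, 0)

-- ===== CLAIM (what is proved, stated in full; the proofs are below) =====
def Claim_unchanged_nextHighest : Prop := ∀ (playerHand : List (Int × String)) (prevHigh : Int), Dom_nextHighest playerHand prevHigh → Spec_nextHighest playerHand prevHigh (nextHighest playerHand prevHigh)
def Claim_changed_nextHighest : Prop := Dom_nextHighest (pvDiffWitness_nextHighest.1) (pvDiffWitness_nextHighest.2) ∧ D_nextHighest (pvDiffWitness_nextHighest.1) (pvDiffWitness_nextHighest.2) ∧ nextHighest (pvDiffWitness_nextHighest.1) (pvDiffWitness_nextHighest.2) = pvDiffWitnessOut_nextHighest.1 ∧ nextHighest_alt (pvDiffWitness_nextHighest.1) (pvDiffWitness_nextHighest.2) = pvDiffWitnessOut_nextHighest.2 ∧ pvDiffWitnessOut_nextHighest.1 ≠ pvDiffWitnessOut_nextHighest.2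
def Claim_exact_nextHighest : Prop := ∀ (playerHand : List (Int × String)) (prevHigh : Int), Dom_nextHighest playerHand prevHigh → D_nextHighest playerHand prevHigh → nextHighest playerHand prevHigh ≠ nextHighest_alt playerHand prevHigh

-- ===== LEMMAS AND PROOFS =====

-- A's min-loop characterised: result ≤ seed and ≤ every card value, and is the seed or a card value.
theorem loopMinA_spec (h : List (Int × String)) (a : Int) :
    (h.foldl (fun lo c => if c.1 < lo then c.1 else lo) a) ≤ a ∧
    (∀ c ∈ h, (h.foldl (fun lo c => if c.1 < lo then c.1 else lo) a) ≤ c.1) ∧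
    ((h.foldl (fun lo c => if c.1 < lo then c.1 else lo) a) = a ∨
      (h.foldl (fun lo c => if c.1 < lo then c.1 else lo) a) ∈ h.map (fun c => c.1)) := by
  induction h generalizing a with
  | nil => simp
  | cons v t ih =>
    simp only [List.foldl_cons]
    by_cases hv : v.1 < a
    · rw [if_pos hv]
      rcases ih v.1 with ⟨h1, h2, h3⟩
      refine ⟨by omega, ?_, ?_⟩
      · intro c hc
        rcases List.mem_cons.mp hc with rfl | hc
        · exact h1
        · exact h2 c hc
      · rcases h3 with h3 | h3
        · right; rw [h3]; exact List.mem_cons_self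
        · right; exact List.mem_cons_of_mem _ h3
    · rw [if_neg hv]
      rcases ih a with ⟨h1, h2, h3⟩
      refine ⟨h1, ?_, ?_⟩
      · intro c hc
        rcases List.mem_cons.mp hc with rfl | hc
        · omega
        · exact h2 c hc
      · rcases h3 with h3 | h3
        · left; exact h3
        · right; exact List.mem_cons_of_mem _ h3

-- A's max-below loop characterised.
theorem loopMaxA_spec (k : Int) (h : List (Int × String)) (a : Int) :
    a ≤ (h.foldl (fun hi c => if c.1 > hi ∧ c.1 < k then c.1 else hi) a) ∧
    (∀ c ∈ h, c.1 < k → c.1 ≤ (h.foldl (fun hi c => if c.1 > hi ∧ c.1 < k then c.1 else hi) a)) ∧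
    ((h.foldl (fun hi c => if c.1 > hi ∧ c.1 < k then c.1 else hi) a) = a ∨
      ((h.foldl (fun hi c => if c.1 > hi ∧ c.1 < k then c.1 else hi) a) ∈ h.map (fun c => c.1) ∧
        (h.foldl (fun hi c => if c.1 > hi ∧ c.1 < k then c.1 else hi) a) < k)) := by
  induction h generalizing a with
  | nil => simp
  | cons v t ih =>
    simp only [List.foldl_cons]
    by_cases hv : v.1 > a ∧ v.1 < k
    · rw [if_pos hv]
      rcases ih v.1 with ⟨h1, h2, h3⟩
      refine ⟨by omega, ?_, ?_⟩
      · intro c hc hck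
        rcases List.mem_cons.mp hc with rfl | hc
        · exact h1
        · exact h2 c hc hck
      · rcases h3 with h3 | h3
        · right; rw [h3]; exact ⟨List.mem_cons_self, hv.2⟩
        · right; exact ⟨List.mem_cons_of_mem _ h3.1, h3.2⟩
    · rw [if_neg hv]
      rcases ih a with ⟨h1, h2, h3⟩
      refine ⟨h1, ?_, ?_⟩
      · intro c hc hck
        rcases List.mem_cons.mp hc with rfl | hc
        · rcases (Decidable.not_and_iff_or_not ..).mp hv with hv | hv <;> omega
        · exact h2 c hc hck
      · rcases h3 with h3 | h3
        · left; exact h3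
        · right; exact ⟨List.mem_cons_of_mem _ h3.1, h3.2⟩

-- B's ascending walk characterised (l strictly ascending).
theorem walkB_spec (k : Int) (l : List Int) (hl : l.Pairwise (· < ·)) (b : Int) :
    b ≤ walkB l k b ∧
    (∀ y ∈ l, y < k → y ≤ walkB l k b) ∧
    (walkB l k b = b ∨ (walkB l k b ∈ l ∧ walkB l k b < k)) := by
  induction l generalizing b with
  | nil => exact ⟨le_refl b, by simp, Or.inl rfl⟩
  | cons v t ih =>
    rcases List.pairwise_cons.mp hl with ⟨hv, ht⟩
    have hstep : walkB (v :: t) k b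
        = if v ≥ k then b else walkB t k (if v > b then v else b) := rfl
    by_cases h : v ≥ k
    · rw [hstep, if_pos h]
      refine ⟨le_refl b, ?_, Or.inl rfl⟩
      intro y hy hyk
      rcases List.mem_cons.mp hy with rfl | hy
      · omega
      · have := hv y hy; omega
    · rw [hstep, if_neg h]
      by_cases h0 : v > b
      · rw [if_pos h0]
        rcases ih ht v with ⟨i1, i2, i3⟩
        refine ⟨by omega, ?_, ?_⟩
        · intro y hy hyk
          rcases List.mem_cons.mp hy with rfl | hy
          · omega
          · exact i2 y hy hyk
        · rcases i3 with i3 | i3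
          · right; rw [i3]; exact ⟨List.mem_cons_self, by omega⟩
          · right; exact ⟨List.mem_cons_of_mem _ i3.1, i3.2⟩
      · rw [if_neg h0]
        rcases ih ht b with ⟨i1, i2, i3⟩
        refine ⟨i1, ?_, ?_⟩
        · intro y hy hyk
          rcases List.mem_cons.mp hy with rfl | hy
          · omega
          · exact i2 y hy hyk
        · rcases i3 with i3 | i3
          · left; exact i3
          · right; exact ⟨List.mem_cons_of_mem _ i3.1, i3.2⟩

theorem mem_vals_iff (vs : List Int) (y : Int) :
    y ∈ PySem.List.sorted (PySem.Set.ofList vs) (fun x => x) false ↔ y ∈ vs := by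
  rw [PySem.List.mem_sorted]; exact PySem.Set.mem_ofList vs y

-- the two else-branches are always equal: both compute max({0} ∪ {v ∈ values | v < k}).
theorem high_eq (h : List (Int × String)) (k : Int) :
    (h.foldl (fun hi c => if c.1 > hi ∧ c.1 < k then c.1 else hi) 0) =
      walkB (PySem.List.sorted (PySem.Set.ofList (h.map (fun c => c.1))) (fun x => x) false) k 0 := by
  set vals := PySem.List.sorted (PySem.Set.ofList (h.map (fun c => c.1))) (fun x => x) false with hv
  have hpw : vals.Pairwise (· < ·) := PySem.List.sorted_ofList_pairwise_lt (h.map (fun c => c.1))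
  rcases loopMaxA_spec k h 0 with ⟨a1, a2, a3⟩
  rcases walkB_spec k vals hpw 0 with ⟨b1, b2, b3⟩
  have hmem : ∀ y, y ∈ vals ↔ y ∈ h.map (fun c => c.1) := fun y => mem_vals_iff _ y
  have hba : walkB vals k 0 ≤ h.foldl (fun hi c => if c.1 > hi ∧ c.1 < k then c.1 else hi) 0 := by
    rcases b3 with hb | ⟨hm, hk⟩
    · omega
    · rcases List.mem_map.mp ((hmem _).mp hm) with ⟨c, hc, hcv⟩
      have := a2 c hc (by omega); omega
  have hab : h.foldl (fun hi c => if c.1 > hi ∧ c.1 < k then c.1 else hi) 0 ≤ walkB vals k 0 := by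
    rcases a3 with ha | ⟨hm, hk⟩
    · omega
    · exact b2 _ ((hmem _).mpr hm) hk
  omega

-- the head of the sorted distinct values is a lower bound of all card values.
theorem head_le_all (h : List (Int × String)) (v0 : Int) (t : List Int)
    (hs : PySem.List.sorted (PySem.Set.ofList (h.map (fun c => c.1))) (fun x => x) false = v0 :: t) :
    ∀ c ∈ h, v0 ≤ c.1 := by
  intro c hc
  have hh := PySem.List.key_head_sorted_le (h := hs)
  exact hh c.1 ((PySem.Set.mem_ofList _ _).mpr (List.mem_map.mpr ⟨c, hc, rfl⟩))

theorem head_mem (h : List (Int × String)) (v0 : Int) (t : List Int)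
    (hs : PySem.List.sorted (PySem.Set.ofList (h.map (fun c => c.1))) (fun x => x) false = v0 :: t) :
    ∃ c ∈ h, c.1 = v0 := by
  have : v0 ∈ h.map (fun c => c.1) := (mem_vals_iff _ v0).mp (hs ▸ List.mem_cons_self)
  rcases List.mem_map.mp this with ⟨c, hc, hcv⟩
  exact ⟨c, hc, hcv⟩

-- the sorted list is empty iff the hand is empty.
theorem sorted_nil_iff (h : List (Int × String)) :
    PySem.List.sorted (PySem.Set.ofList (h.map (fun c => c.1))) (fun x => x) false = [] ↔ h = [] := by
  constructor
  · intro hs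
    rcases h with _ | ⟨x, r⟩
    · rfl
    · exfalso
      have : x.1 ∈ PySem.List.sorted (PySem.Set.ofList ((x :: r).map (fun c => c.1))) (fun y => y) false :=
        (mem_vals_iff _ _).mpr (by simp)
      rw [hs] at this; exact (List.not_mem_nil) this
  · intro hh; subst hh; rfl

-- lowCardA as the foldl over the hand.
theorem lowCardA_eq_foldl (h : List (Int × String)) :
    lowCardA h = h.foldl (fun lo c => if c.1 < lo then c.1 else lo) 14 := by
  unfold lowCardA
  exact PySem.List.foldl_pyRange_zero_pyGetD' h ((0 : Int), "")
    (fun lowIndex c => if c.1 < lowIndex then c.1 else lowIndex) 14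

-- ===== VERDICT (by name: the statements are the Claim_ definitions above) =====
theorem nextHighest_spec : Claim_unchanged_nextHighest := by
  intro h k _ hnD
  unfold nextHighest nextHighest_alt
  rw [lowCardA_eq_foldl,
      PySem.List.foldl_pyRange_zero_pyGetD' h ((0 : Int), "")
        (fun highIndex c => if c.1 > highIndex ∧ c.1 < k then c.1 else highIndex) 0,
      high_eq h k]
  -- the two branch conditions agree outside D_
  have hcond : (k = h.foldl (fun lo c => if c.1 < lo then c.1 else lo) 14) ↔
      ((PySem.List.sorted (PySem.Set.ofList (h.map (fun c => c.1))) (fun x => x) false).head? = some k) := by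
    rcases loopMinA_spec h 14 with ⟨l1, l2, l3⟩
    rcases hs : PySem.List.sorted (PySem.Set.ofList (h.map (fun c => c.1))) (fun x => x) false
      with _ | ⟨v0, t⟩
    · rw [hs]
      have hh : h = [] := (sorted_nil_iff h).mp hs
      subst hh
      simp only [List.foldl_nil]
      constructor
      · intro hk; exact absurd ⟨by simp, Or.inl hk⟩ hnD
      · intro hk; simp at hk
    · rw [hs]
      have hle : ∀ c ∈ h, v0 ≤ c.1 := head_le_all h v0 t hs
      rcases head_mem h v0 t hs with ⟨c0, hc0, hc0v⟩
      by_cases h14 : v0 ≤ 14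
      · -- lowCardA = v0
        have hLv : h.foldl (fun lo c => if c.1 < lo then c.1 else lo) 14 = v0 := by
          have h1 := l2 c0 hc0
          have h2 : v0 ≤ h.foldl (fun lo c => if c.1 < lo then c.1 else lo) 14 := by
            rcases l3 with l3 | l3
            · omega
            · rcases List.mem_map.mp l3 with ⟨c, hc, hcv⟩
              have := hle c hc; omega
          omega
        rw [hLv]
        simp only [List.head?_cons, Option.some.injEq]
        exact ⟨fun hk => hk.symm, fun hk => hk.symm⟩
      · -- all values > 14, lowCardA = 14, and ¬D_ forces both conditions false
        have hall : ∀ c ∈ h, 14 < c.1 := by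
          intro c hc; have := hle c hc; omega
        have hL14 : h.foldl (fun lo c => if c.1 < lo then c.1 else lo) 14 = 14 := by
          rcases l3 with l3 | l3
          · exact l3
          · rcases List.mem_map.mp l3 with ⟨c, hc, hcv⟩
            have h1 := hall c hc; have h2 := l2 c hc; omega
        rw [hL14]
        simp only [List.head?_cons, Option.some.injEq]
        constructor
        · intro hk; exact (hnD ⟨hall, Or.inl hk⟩).elim
        · intro hk
          refine (hnD ⟨hall, Or.inr ⟨⟨c0, hc0, by omega⟩, ?_⟩⟩).elim
          intro c hc; have := hle c hc; omega
  by_cases hk : k = h.foldl (fun lo c => if c.1 < lo then c.1 else lo) 14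
  · rw [if_pos hk, if_pos (hcond.mp hk)]
  · rw [if_neg hk, if_neg (fun hh => hk (hcond.mpr hh))]

theorem nextHighest_changed : Claim_changed_nextHighest := by
  unfold Claim_changed_nextHighest; decide

theorem nextHighest_tight : Claim_exact_nextHighest := by
  intro h k _ hD
  rcases hD with ⟨hall, hD⟩
  unfold nextHighest nextHighest_alt
  rw [lowCardA_eq_foldl,
      PySem.List.foldl_pyRange_zero_pyGetD' h ((0 : Int), "")
        (fun highIndex c => if c.1 > highIndex ∧ c.1 < k then c.1 else highIndex) 0,
      high_eq h k]
  rcases loopMinA_spec h 14 with ⟨l1, l2, l3⟩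
  have hL14 : h.foldl (fun lo c => if c.1 < lo then c.1 else lo) 14 = 14 := by
    rcases l3 with l3 | l3
    · exact l3
    · rcases List.mem_map.mp l3 with ⟨c, hc, hcv⟩
      have h1 := hall c hc; have h2 := l2 c hc; omega
  have hpw : (PySem.List.sorted (PySem.Set.ofList (h.map (fun c => c.1))) (fun x => x) false).Pairwise (· < ·) :=
    PySem.List.sorted_ofList_pairwise_lt (h.map (fun c => c.1))
  rcases walkB_spec k (PySem.List.sorted (PySem.Set.ofList (h.map (fun c => c.1))) (fun x => x) false) hpw 0
    with ⟨b1, b2, b3⟩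
  rcases hD with hk14 | ⟨⟨c0, hc0, hc0v⟩, hlb⟩
  · -- prevHigh = 14: A returns 14, B returns 0
    subst hk14
    rw [hL14, if_pos rfl]
    have hW0 : walkB (PySem.List.sorted (PySem.Set.ofList (h.map (fun c => c.1))) (fun x => x) false) 14 0 = 0 := by
      rcases b3 with b3 | ⟨bm, blt⟩
      · exact b3
      · rcases List.mem_map.mp ((mem_vals_iff _ _).mp bm) with ⟨c, hc, hcv⟩
        have := hall c hc; omega
    have hhead : ¬ ((PySem.List.sorted (PySem.Set.ofList (h.map (fun c => c.1))) (fun x => x) false).head? = some (14 : Int)) := by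
      rcases hs : PySem.List.sorted (PySem.Set.ofList (h.map (fun c => c.1))) (fun x => x) false
        with _ | ⟨v0, t⟩
      · rw [hs]; simp
      · rw [hs]
        rcases head_mem h v0 t hs with ⟨c, hc, hcv⟩
        have := hall c hc
        simp only [List.head?_cons, Option.some.injEq]
        omega
    rw [if_neg hhead, hW0]
    decide
  · -- prevHigh = minimum card value (> 14): A returns 0, B returns prevHigh
    have hk14' : 14 < k := by have := hall c0 hc0; omega
    rw [hL14, if_neg (by omega)]
    have hhead : (PySem.List.sorted (PySem.Set.ofList (h.map (fun c => c.1))) (fun x => x) false).head? = some k := by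
      rcases hs : PySem.List.sorted (PySem.Set.ofList (h.map (fun c => c.1))) (fun x => x) false
        with _ | ⟨v0, t⟩
      · exfalso
        have : c0.1 ∈ PySem.List.sorted (PySem.Set.ofList (h.map (fun c => c.1))) (fun x => x) false :=
          (mem_vals_iff _ _).mpr (List.mem_map.mpr ⟨c0, hc0, rfl⟩)
        rw [hs] at this; exact List.not_mem_nil this
      · rw [hs]
        have hle := head_le_all h v0 t hs
        rcases head_mem h v0 t hs with ⟨c1, hc1, hc1v⟩
        have h1 := hle c0 hc0
        have h2 := hlb c1 hc1
        simp only [List.head?_cons, Option.some.injEq]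
        omega
    rw [if_pos hhead]
    -- A's else value: the max loop over values all ≥ k stays at its seed 0
    rcases loopMaxA_spec k h 0 with ⟨a1, a2, a3⟩
    have hA0 : h.foldl (fun hi c => if c.1 > hi ∧ c.1 < k then c.1 else hi) 0 = 0 := by
      rcases a3 with a3 | ⟨am, alt⟩
      · exact a3
      · rcases List.mem_map.mp am with ⟨c, hc, hcv⟩
        have := hlb c hc; omega
    rw [high_eq h k] at hA0
    rw [hA0]
    omega
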